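-- pv_equiv track=rewrite | github.com/Jagadish-prasad-mohanty/codeForce-900 | wizardOfOrz.py | getMaxmOp
-- ===== SOURCE A (Python) =====
-- def getMaxmOp(n):
--     if(n==1):
--         return 9
--     if n==2:
--         return 98
--     res="98"
--     inc=9
--     for i in range(n-2):
--         res=res+str(inc)
--         if inc==9:
--             inc=0
--         else:
--             inc+=1
--
--     return res
-- ===== SOURCE B (Python) =====
-- def getMaxmOp(n):
--     if n == 1:
--         return 9
--     if n == 2:
--         return 98
--     m = n - 2
--     if m <= 0:
--         return "98"
--     return "98" + ("9012345678" * (m // 10 + 1))[:m]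
-- ===== Notes on version B (the rewrite author's own statement) =====
-- stated objective: faster
-- what changed: Replaces the stateful char-by-char loop (string concatenation plus an if/else digit counter) with a closed-form tiling: repeat the period-10 cycle '9012345678' enough times and slice to length n-2.
-- outside the precondition, e.g. on getMaxmOp(1): A returns 9, B returns 9; on getMaxmOp(2): A returns 98, B returns 98
import Mathlib
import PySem

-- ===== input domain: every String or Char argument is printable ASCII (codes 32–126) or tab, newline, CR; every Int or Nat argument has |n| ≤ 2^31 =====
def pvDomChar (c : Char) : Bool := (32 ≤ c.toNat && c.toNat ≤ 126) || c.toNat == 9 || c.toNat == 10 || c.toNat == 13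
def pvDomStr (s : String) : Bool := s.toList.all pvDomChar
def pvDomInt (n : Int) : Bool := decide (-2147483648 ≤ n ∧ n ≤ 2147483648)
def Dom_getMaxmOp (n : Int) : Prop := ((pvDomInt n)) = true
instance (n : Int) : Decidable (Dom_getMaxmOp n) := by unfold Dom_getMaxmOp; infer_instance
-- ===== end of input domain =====

-- B replaces A's char-by-char loop with tiling the period-10 cycle and slicing; faster asymptotically in Python.
-- A (and B) return Python ints (9 and 98) for n == 1 / n == 2, outside the String return type; Pre_ excludes those two inputs.

-- ===== PORT A =====
-- the 'if n == 1: return 9' and 'if n == 2: return 98' branches return Python ints, not strings;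
-- those two inputs are excluded by Pre_getMaxmOp, so only the loop is ported.
def getMaxmOp (n : Int) : String :=
  ((PySem.List.pyRange 0 (n - 2) 1).foldl
      (fun (st : String × Int) _ =>
        (st.1 ++ PySem.Int.toStr st.2, if st.2 = 9 then 0 else st.2 + 1))
      ("98", 9)).1

-- ===== PORT B =====
-- the literal "9012345678" of Source B
def cycB : List Char := "9012345678".toList

-- the int-returning n == 1 / n == 2 branches of Source B are likewise outside Pre_ and not ported.
def getMaxmOp_alt (n : Int) : String :=
  let m := n - 2
  if m ≤ 0 then "98"
  else "98" ++ String.ofList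
    (((List.replicate (PySem.Int.floordiv m 10 + 1).toNat cycB).flatten).take m.toNat)

-- ===== PRECONDITION & SPEC =====
-- Pre_ excludes n = 1 and n = 2, where the Python A returns the ints 9 and 98 — values outside the declared String return type.
def Pre_getMaxmOp (n : Int) : Prop := n ≠ 1 ∧ n ≠ 2
instance (n : Int) : Decidable (Pre_getMaxmOp n) := by unfold Pre_getMaxmOp; infer_instance
def pvWitness_getMaxmOp : Int := 5

def Spec_getMaxmOp (n : Int) (out : String) : Prop := out = getMaxmOp_alt n
instance (n : Int) (out : String) : Decidable (Spec_getMaxmOp n out) := by unfold Spec_getMaxmOp; infer_instance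

-- ===== CLAIM (what is proved, stated in full; the proofs are below) =====
def Claim_equal_getMaxmOp : Prop := ∀ (n : Int), Dom_getMaxmOp n → Pre_getMaxmOp n → Spec_getMaxmOp n (getMaxmOp n)

-- ===== LEMMAS AND PROOFS =====

-- the loop body of A's port, named for the proofs
def stepA (st : String × Int) : String × Int :=
  (st.1 ++ PySem.Int.toStr st.2, if st.2 = 9 then 0 else st.2 + 1)

-- the tail both programs emit: char i is the cycle digit at position i
def fSeq (k : Nat) : List Char := (List.range k).map (fun i => cycB.getD (i % 10) ' ')

lemma foldl_const_step (l : List Int) (st : String × Int) :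
    l.foldl (fun s (_ : Int) => stepA s) st = stepA^[l.length] st := by
  induction l generalizing st with
  | nil => rfl
  | cons x xs ih => simp [List.foldl_cons, ih, Function.iterate_succ_apply]

lemma digit_toStr (j : Nat) (hj : j < 10) :
    PySem.Int.toStr (((j + 9) % 10 : Nat) : Int) = String.ofList [cycB.getD j ' '] := by
  interval_cases j <;> decide

lemma iterA (k : Nat) :
    stepA^[k] ("98", (9 : Int)) = (String.ofList ('9' :: '8' :: fSeq k), (((k + 9) % 10 : Nat) : Int)) := by
  induction k with
  | zero => decide
  | succ k ih =>
    rw [Function.iterate_succ_apply', ih]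
    unfold stepA fSeq
    refine Prod.ext ?_ ?_
    · show String.ofList ('9' :: '8' :: fSeq k) ++ PySem.Int.toStr (((k + 9) % 10 : Nat) : Int) = _
      rw [show ((k + 9) % 10 : Nat) = ((k % 10 + 9) % 10 : Nat) from by omega,
          digit_toStr (k % 10) (by omega)]
      simp only [fSeq, List.range_succ, List.map_append, List.map_cons, List.map_nil]
      rw [← String.ofList_append]
      rfl
    · show (if (((k + 9) % 10 : Nat) : Int) = 9 then (0 : Int) else ((k + 9) % 10 : Nat) + 1) = _
      by_cases h : (k + 9) % 10 = 9
      · rw [if_pos (by exact_mod_cast h)]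
        have : (k + 1 + 9) % 10 = 0 := by omega
        simp [this]
      · rw [if_neg (by exact_mod_cast h)]
        have : (k + 1 + 9) % 10 = (k + 9) % 10 + 1 := by omega
        rw [this]; push_cast; ring

lemma flat_get (r i : Nat) (h : i < 10 * r) :
    ((List.replicate r cycB).flatten)[i]? = some (cycB.getD (i % 10) ' ') := by
  induction r generalizing i with
  | zero => omega
  | succ r ih =>
    have hlen : cycB.length = 10 := by decide
    rw [List.replicate_succ, List.flatten_cons]
    by_cases hi : i < 10
    · rw [List.getElem?_append_left (by omega)]
      have : i % 10 = i := by omega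
      rw [this, List.getElem?_eq_getElem (by omega), List.getD_eq_getElem cycB ' ' (by omega)]
    · rw [List.getElem?_append_right (by omega), hlen]
      have : (i - 10) % 10 = i % 10 := by omega
      rw [ih (i - 10) (by omega), this]

lemma flat_take (k r : Nat) (h : k ≤ 10 * r) :
    ((List.replicate r cycB).flatten).take k = fSeq k := by
  apply List.ext_getElem?
  intro i
  rw [List.getElem?_take]
  unfold fSeq
  by_cases hi : i < k
  · rw [if_pos hi, flat_get r i (by omega)]
    simp [List.getElem?_map, List.getElem?_range hi]
  · rw [if_neg hi]
    symm
    rw [List.getElem?_eq_none_iff]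
    simp; omega

lemma string98_cons (l : List Char) :
    "98" ++ String.ofList l = String.ofList ('9' :: '8' :: l) := by
  have : ("98" : String) = String.ofList ['9', '8'] := rfl
  rw [this, ← String.ofList_append]; rfl

-- ===== VERDICT (by name: the statement is the Claim_ definition above) =====
theorem getMaxmOp_spec : Claim_equal_getMaxmOp := by
  intro n _ _
  unfold Spec_getMaxmOp getMaxmOp getMaxmOp_alt
  by_cases hn : n ≤ 2
  · rw [PySem.List.pyRange_one_eq_nil (by omega)]
    simp only [List.foldl_nil]
    rw [if_pos (by omega)]
  · -- n ≥ 3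
    have h2 : (0 : Int) < n - 2 := by omega
    set k : Nat := (n - 2).toNat with hk
    have hkc : ((k : Int)) = n - 2 := by omega
    have hA : ((PySem.List.pyRange 0 (n - 2) 1).foldl
        (fun (st : String × Int) _ =>
          (st.1 ++ PySem.Int.toStr st.2, if st.2 = 9 then 0 else st.2 + 1))
        ("98", 9)).1 = String.ofList ('9' :: '8' :: fSeq k) := by
      have : ((PySem.List.pyRange 0 (n - 2) 1).foldl
          (fun (st : String × Int) _ => stepA st) ("98", 9)) = stepA^[k] ("98", (9 : Int)) := by
        rw [foldl_const_step]
        congr 1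
        rw [PySem.List.length_pyRange_one]
        omega
      rw [show (fun (st : String × Int) (_ : Int) =>
            (st.1 ++ PySem.Int.toStr st.2, if st.2 = 9 then 0 else st.2 + 1)) =
          (fun (st : String × Int) (_ : Int) => stepA st) from rfl, this, iterA]
    rw [hA, if_neg (by omega)]
    rw [PySem.Int.floordiv_eq_ediv_of_pos (by omega)]
    have hdiv : ((n - 2) / 10 + 1).toNat = k / 10 + 1 := by omega
    rw [hdiv, show (n - 2).toNat = k from rfl, flat_take k (k / 10 + 1) (by omega), string98_cons]
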